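-- pv_equiv track=rewrite | github.com/Parag2367/pythonLearn | DSA/Sorting/21.practice.py | superior
-- ===== SOURCE A (Python) =====
-- def superior(nums):
--     n = len(nums)
--     maxi = float("-inf")
--     result = []
--
--     for i in range(n - 1, -1, -1):
--         if nums[i] > maxi:
--             result.append(nums[i])
--             maxi = nums[i]
--
--     return result
-- ===== SOURCE B (Python) =====
-- def superior(nums):
--     # Pass 1: materialize the suffix-maximum table, aligned with reversed(nums):
--     # smax[j] = max of the elements strictly to the right of the j-th element
--     # of the reversed traversal (None = no element to the right).
--     smax = []
--     cur = None
--     for x in reversed(nums):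
--         smax.append(cur)
--         cur = x if cur is None or x > cur else cur
--     # Pass 2: filter against the table, keeping the rightmost-first order.
--     result = []
--     for x, m in zip(reversed(nums), smax):
--         if m is None or x > m:
--             result.append(x)
--     return result
-- ===== Notes on version B (the rewrite author's own statement) =====
-- stated objective: alternative
-- what changed: A fuses filtering with a running maximum in one right-to-left loop; B first materializes an explicit suffix-maximum table in one pass and then filters the reversed list against that table in a second pass.
import Mathlib
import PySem

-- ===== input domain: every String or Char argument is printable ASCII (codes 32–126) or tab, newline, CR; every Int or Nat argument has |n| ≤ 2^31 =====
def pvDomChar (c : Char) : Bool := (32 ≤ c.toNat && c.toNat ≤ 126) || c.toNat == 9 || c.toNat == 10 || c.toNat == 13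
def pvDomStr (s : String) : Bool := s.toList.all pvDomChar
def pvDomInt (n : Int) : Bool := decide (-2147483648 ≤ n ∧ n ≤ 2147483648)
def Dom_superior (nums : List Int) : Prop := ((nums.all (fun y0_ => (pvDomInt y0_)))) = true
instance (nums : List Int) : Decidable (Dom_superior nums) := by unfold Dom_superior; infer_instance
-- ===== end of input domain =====

-- B replaces A's fused running-max collecting loop by two passes: materialize a suffix-maximum
-- table, then filter the reversed list against it (objective: alternative decomposition).


-- ===== PORT A =====
-- maxi = float("-inf") is modelled as `none` (every int compares greater than it).
def superior (nums : List Int) : List Int :=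
  let n : Int := nums.length
  ((PySem.List.pyRange (n - 1) (-1) (-1)).foldl
    (fun (st : Option Int × List Int) (i : Int) =>
      let v := PySem.List.pyGetD nums i 0
      match st.1 with
      | none => (some v, st.2 ++ [v])
      | some m => if v > m then (some v, st.2 ++ [v]) else st)
    (none, [])).2

-- ===== PORT B =====
-- Pass 1 materializes the suffix-maximum table smax (aligned with reversed nums,
-- `none` = no element to the right); pass 2 filters the reversed list against it.
def superior_alt (nums : List Int) : List Int :=
  let p := nums.reverse.foldl
    (fun (st : List (Option Int) × Option Int) (x : Int) =>
      (st.1 ++ [st.2],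
       match st.2 with
       | none => some x
       | some c => if x > c then some x else some c))
    ([], none)
  (nums.reverse.zip p.1).foldl
    (fun (r : List Int) (xm : Int × Option Int) =>
      match xm.2 with
      | none => r ++ [xm.1]
      | some m => if xm.1 > m then r ++ [xm.1] else r)
    []

-- ===== PRECONDITION & SPEC =====
def Spec_superior (nums : List Int) (out : List Int) : Prop := out = superior_alt nums
instance (nums : List Int) (out : List Int) : Decidable (Spec_superior nums out) := by unfold Spec_superior; infer_instance

-- ===== CLAIM (what is proved, stated in full; the proofs are below) =====
def Claim_equal_superior : Prop := ∀ (nums : List Int), Dom_superior nums → Spec_superior nums (superior nums)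

-- ===== LEMMAS AND PROOFS =====

/-- Running-maximum update (`none` = nothing seen yet). -/
def pvPm (m : Option Int) (x : Int) : Option Int :=
  match m with
  | none => some x
  | some c => if x > c then some x else some c

/-- The "strictly greater than everything seen so far" test. -/
def pvCond (m : Option Int) (x : Int) : Bool :=
  match m with
  | none => true
  | some c => decide (x > c)

/-- Prefix-maximum table of a list (the value BEFORE each element). -/
def pvTable (m : Option Int) : List Int → List (Option Int)
  | [] => []
  | x :: xs => m :: pvTable (pvPm m x) xs

/-- Common specification of both loops: the elements greater than the running maximum. -/
def pvCollect (m : Option Int) : List Int → List Int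
  | [] => []
  | x :: xs => (if pvCond m x then [x] else []) ++ pvCollect (pvPm m x) xs

/-- A's loop body, on the element value. -/
def pvStepA (st : Option Int × List Int) (v : Int) : Option Int × List Int :=
  match st.1 with
  | none => (some v, st.2 ++ [v])
  | some m => if v > m then (some v, st.2 ++ [v]) else st

/-- B's first-pass body. -/
def pvStep1 (st : List (Option Int) × Option Int) (x : Int) : List (Option Int) × Option Int :=
  (st.1 ++ [st.2],
   match st.2 with
   | none => some x
   | some c => if x > c then some x else some c)

/-- B's second-pass body. -/
def pvStep2 (r : List Int) (xm : Int × Option Int) : List Int :=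
  match xm.2 with
  | none => r ++ [xm.1]
  | some m => if xm.1 > m then r ++ [xm.1] else r

theorem pvA_loop (xs : List Int) : ∀ (m : Option Int) (r : List Int),
    (xs.foldl pvStepA (m, r)).2 = r ++ pvCollect m xs := by
  induction xs with
  | nil => intro m r; simp [pvCollect]
  | cons x xs ih =>
    intro m r
    cases m with
    | none => simp [List.foldl_cons, pvStepA, pvCollect, pvCond, pvPm, ih]
    | some c =>
      by_cases h : x > c <;>
        simp [List.foldl_cons, pvStepA, pvCollect, pvCond, pvPm, h, ih]

theorem pvB_table (xs : List Int) : ∀ (acc : List (Option Int)) (m : Option Int),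
    (xs.foldl pvStep1 (acc, m)).1 = acc ++ pvTable m xs := by
  induction xs with
  | nil => intro acc m; simp [pvTable]
  | cons x xs ih =>
    intro acc m
    cases m with
    | none => simp [List.foldl_cons, pvStep1, pvTable, pvPm, ih]
    | some c =>
      by_cases h : x > c <;>
        simp [List.foldl_cons, pvStep1, pvTable, pvPm, h, ih]

theorem pvB_filter (xs : List Int) : ∀ (m : Option Int) (r : List Int),
    ((xs.zip (pvTable m xs)).foldl pvStep2 r) = r ++ pvCollect m xs := by
  induction xs with
  | nil => intro m r; simp [pvTable, pvCollect]
  | cons x xs ih =>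
    intro m r
    cases m with
    | none => simp [pvStep2, pvTable, pvCollect, pvCond, pvPm, List.zip_cons_cons, ih]
    | some c =>
      by_cases h : x > c <;>
        simp [pvStep2, pvTable, pvCollect, pvCond, pvPm, h, List.zip_cons_cons, ih]

theorem pvA_eq_collect (nums : List Int) : superior nums = pvCollect none nums.reverse := by
  show ((PySem.List.pyRange ((nums.length : Int) - 1) (-1) (-1)).foldl
      (fun st i => pvStepA st (PySem.List.pyGetD nums i 0)) (none, [])).2
      = pvCollect none nums.reverse
  rw [← List.foldl_map (f := fun i => PySem.List.pyGetD nums i 0) (g := pvStepA)]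
  have hr : PySem.List.pyRange ((nums.length : Int) - 1) (-1) (-1)
      = (PySem.List.pyRange 0 (nums.length : Int) 1).reverse := by
    rw [PySem.List.pyRange_neg_one_eq_reverse]; norm_num
  rw [hr, List.map_reverse, PySem.List.map_pyGetD_pyRange_zero']
  rw [List.foldl_reverse]
  rw [← List.foldl_reverse]
  exact pvA_loop nums.reverse none []

theorem pvB_eq_collect (nums : List Int) : superior_alt nums = pvCollect none nums.reverse := by
  show ((nums.reverse.zip ((nums.reverse.foldl pvStep1 ([], none)).1)).foldl pvStep2 [])
      = pvCollect none nums.reverse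
  rw [pvB_table nums.reverse [] none, List.nil_append]
  exact pvB_filter nums.reverse none []

-- ===== VERDICT (by name: the statement is the Claim_ definition above) =====
theorem superior_spec : Claim_equal_superior := by
  intro nums _
  unfold Spec_superior
  rw [pvA_eq_collect, pvB_eq_collect]
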